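-- pv_equiv track=rewrite | github.com/saberzero1/advent-of-code-2022 | Day 8/Day8-2.py | scene_score_west
-- ===== SOURCE A (Python) =====
-- def scene_score_west(grid, i, j):
--     # loop through the trees to the west
--     current = grid[i][j]
--     count = 0
--     for k in range(j - 1, -1, -1):
--         # if the tree is taller than the tree at (i, j)
--         if grid[i][k] >= current:
--             # the tree at (i, j) is not visible
--             count += 1
--             return count
--         # increment the count
--         count += 1
--     return count
-- ===== SOURCE B (Python) =====
-- def scene_score_west(grid, i, j):
--     # Forward (west-to-east) pass over the entire west prefix with a resetting
--     # accumulator: a blocking tree resets the running distance to 1, a shorter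
--     # tree extends it by 1. No backward search, no early exit.
--     h = grid[i][j]
--     d = 0
--     for t in grid[i][:j]:
--         d = 1 if t >= h else d + 1
--     return d
-- ===== Notes on version B (the rewrite author's own statement) =====
-- stated objective: alternative
-- what changed: Replaces A's backward index loop that searches for the first blocker and returns early with a forward west-to-east pass over the whole prefix maintaining a resetting distance accumulator (blocker resets d to 1, shorter tree does d+1), with no early exit.
-- outside the precondition, e.g. on scene_score_west([[1, 2]], 0, -1): A returns 0, B returns 1
import Mathlib
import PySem

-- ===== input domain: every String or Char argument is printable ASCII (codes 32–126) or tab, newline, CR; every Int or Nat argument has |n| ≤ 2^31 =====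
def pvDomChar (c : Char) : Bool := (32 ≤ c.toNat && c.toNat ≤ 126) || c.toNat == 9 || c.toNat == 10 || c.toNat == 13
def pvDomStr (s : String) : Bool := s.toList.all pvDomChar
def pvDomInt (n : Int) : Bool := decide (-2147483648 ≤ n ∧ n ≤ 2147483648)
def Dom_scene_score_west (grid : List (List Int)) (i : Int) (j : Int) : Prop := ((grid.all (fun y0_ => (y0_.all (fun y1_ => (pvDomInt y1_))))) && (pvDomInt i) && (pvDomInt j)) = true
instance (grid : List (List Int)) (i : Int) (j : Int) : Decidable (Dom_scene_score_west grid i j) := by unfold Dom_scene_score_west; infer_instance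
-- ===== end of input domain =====

-- B replaces A's backward search for the first blocker (with early return) by a forward
-- west-to-east pass over the whole prefix with a resetting distance accumulator (alternative).

-- ===== PORT A =====
-- the for-loop over range(j-1,-1,-1) with its early return
def sswLoopA (row : List Int) (current : Int) (ks : List Int) (count : Int) : Int :=
  match ks with
  | [] => count
  | k :: rest =>
    match PySem.List.pyGet? row k with
    | none => 0  -- IndexError; unreachable under Pre_
    | some v => if v ≥ current then count + 1 else sswLoopA row current rest (count + 1)

def scene_score_west (grid : List (List Int)) (i : Int) (j : Int) : Int :=
  match PySem.List.pyGet? grid i with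
  | none => 0  -- IndexError; excluded by Pre_
  | some row =>
    match PySem.List.pyGet? row j with
    | none => 0  -- IndexError; excluded by Pre_
    | some current => sswLoopA row current (PySem.List.pyRange (j - 1) (-1) (-1)) 0

-- ===== PORT B =====
-- forward pass over grid[i][:j] with the resetting accumulator d
def scene_score_west_alt (grid : List (List Int)) (i : Int) (j : Int) : Int :=
  match PySem.List.pyGet? grid i with
  | none => 0  -- IndexError; excluded by Pre_
  | some row =>
    match PySem.List.pyGet? row j with
    | none => 0  -- IndexError; excluded by Pre_
    | some h =>
      (PySem.List.slice row none (some j)).foldl (fun d t => if h ≤ t then 1 else d + 1) 0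

-- ===== PRECONDITION & SPEC =====
-- Pre_ requires in-range indices (i may be negative Python-wraparound) and a NONNEGATIVE column j:
-- on a negative in-range j, A's empty range(j-1,-1,-1) yields an accidental 0 while B iterates a
-- wrapped slice — both values are artefacts of wraparound, outside the puzzle's purpose;
-- out-of-range indices raise IndexError in A.
def Pre_scene_score_west (grid : List (List Int)) (i : Int) (j : Int) : Prop :=
  -(grid.length : Int) ≤ i ∧ i < (grid.length : Int) ∧ 0 ≤ j ∧ j < ((PySem.List.pyGetD grid i []).length : Int)
instance (grid : List (List Int)) (i : Int) (j : Int) : Decidable (Pre_scene_score_west grid i j) := by unfold Pre_scene_score_west; infer_instance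

def pvWitness_scene_score_west : List (List Int) × Int × Int := ([[3, 1, 2]], 0, 2)

def Spec_scene_score_west (grid : List (List Int)) (i : Int) (j : Int) (out : Int) : Prop := out = scene_score_west_alt grid i j
instance (grid : List (List Int)) (i : Int) (j : Int) (out : Int) : Decidable (Spec_scene_score_west grid i j out) := by unfold Spec_scene_score_west; infer_instance

-- ===== CLAIM (what is proved, stated in full; the proofs are below) =====
def Claim_equal_scene_score_west : Prop := ∀ (grid : List (List Int)) (i : Int) (j : Int), Dom_scene_score_west grid i j → Pre_scene_score_west grid i j → Spec_scene_score_west grid i j (scene_score_west grid i j)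

-- ===== LEMMAS AND PROOFS =====

-- the common value: viewing distance west, computed on the reversed west slice
def sswSpec (h : Int) : List Int → Int
  | [] => 0
  | t :: rest => if h ≤ t then 1 else sswSpec h rest + 1

theorem sswLoopA_eq (h : Int) (n : Nat) (row : List Int) (c : Int) (hn : n ≤ row.length) :
    sswLoopA row h (PySem.List.pyRange ((n : Int) - 1) (-1) (-1)) c
      = c + sswSpec h ((row.take n).reverse) := by
  induction n generalizing c with
  | zero =>
    rw [PySem.List.pyRange_neg_one_eq_nil (by norm_num)]
    simp [sswLoopA, sswSpec]
  | succ n ih =>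
    have hlt : n < row.length := hn
    rw [show ((n + 1 : Nat) : Int) - 1 = (n : Int) by push_cast; ring,
        PySem.List.pyRange_neg_one_cons (by omega),
        show (n : Int) - 1 = ((n : Nat) : Int) - 1 from rfl]
    have htake : row.take (n + 1) = row.take n ++ [row[n]] := by
      rw [List.take_add_one]; simp [List.getElem?_eq_getElem hlt]
    simp only [sswLoopA, PySem.List.pyGet?_natCast, List.getElem?_eq_getElem hlt, htake,
      List.reverse_append, List.reverse_singleton, List.singleton_append, sswSpec, ge_iff_le]
    by_cases hb : h ≤ row[n]
    · simp [hb]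
    · simp only [hb, if_false]
      rw [ih (c + 1) (le_of_lt hlt)]
      ring

-- B's forward fold: it equals the backward viewing distance when a blocker exists,
-- and d0 + length when none does
theorem foldlB_eq (h : Int) (l : List Int) (d0 : Int) :
    l.foldl (fun d t => if h ≤ t then 1 else d + 1) d0
      = if l.any (fun t => decide (h ≤ t)) then sswSpec h l.reverse else d0 + l.length := by
  induction l using List.reverseRecOn with
  | nil => simp
  | append_singleton l t ih =>
    rw [List.foldl_append, List.foldl_cons, List.foldl_nil, ih]
    by_cases hb : h ≤ t
    · simp [hb, sswSpec]
    · by_cases ha : l.any (fun t => decide (h ≤ t)) = true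
      · simp [hb, ha, sswSpec]
      · simp [hb, ha]
        ring

-- with no blocker in l, the backward distance is the full length
theorem sswSpec_no_blocker (h : Int) (l : List Int) (hnb : ∀ t ∈ l, ¬ h ≤ t) :
    sswSpec h l = (l.length : Int) := by
  induction l with
  | nil => simp [sswSpec]
  | cons t rest ih =>
    have hb : ¬ h ≤ t := hnb t (by simp)
    simp only [sswSpec, hb, if_false, ih (fun x hx => hnb x (by simp [hx])), List.length_cons]
    push_cast; ring

-- ===== VERDICT (by name: the statement is the Claim_ definition above) =====
theorem scene_score_west_spec : Claim_equal_scene_score_west := by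
  intro grid i j _ hpre
  obtain ⟨hi0, hilt, hj0, hjlt⟩ := hpre
  unfold Spec_scene_score_west scene_score_west scene_score_west_alt
  have hne : PySem.List.pyGet? grid i ≠ none := by
    intro hc
    have hni := (PySem.List.pyGet?_eq_none_iff grid i).mp hc
    apply hni
    simp only [PySem.Raise.InRange]
    omega
  obtain ⟨row, hrow⟩ : ∃ row, PySem.List.pyGet? grid i = some row := by
    cases hg : PySem.List.pyGet? grid i with
    | none => exact absurd hg hne
    | some r => exact ⟨r, rfl⟩
  have hrowD : PySem.List.pyGetD grid i [] = row := by
    simp [PySem.List.pyGetD, hrow]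
  rw [hrowD] at hjlt
  have hjN : j.toNat < row.length := by omega
  have hcur : PySem.List.pyGet? row j = some row[j.toNat] := by
    rw [PySem.List.pyGet?_of_nonneg _ hj0, List.getElem?_eq_getElem hjN]
  simp only [hrow, hcur]
  set h : Int := row[j.toNat]
  -- A side
  have hjcast : j = ((j.toNat : Nat) : Int) := by omega
  have hA : sswLoopA row h (PySem.List.pyRange (j - 1) (-1) (-1)) 0
      = sswSpec h ((row.take j.toNat).reverse) := by
    rw [hjcast, sswLoopA_eq h j.toNat row 0 (le_of_lt hjN)]
    norm_num
    rw [max_eq_left hj0]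
  rw [hA]
  -- B side
  have hwest : PySem.List.slice row none (some j) = row.take j.toNat :=
    PySem.List.slice_to _ hj0
  rw [hwest, foldlB_eq]
  by_cases ha : (row.take j.toNat).any (fun t => decide (h ≤ t)) = true
  · simp [ha]
  · have hnb : ∀ t ∈ (row.take j.toNat).reverse, ¬ h ≤ t := by
      intro t ht
      simp only [List.mem_reverse] at ht
      intro hle
      exact ha (List.any_eq_true.mpr ⟨t, ht, by simpa using hle⟩)
    rw [sswSpec_no_blocker h _ hnb, if_neg ha]
    simp
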